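-- pv_equiv track=rewrite | github.com/JoeLove100/leet-code | august_thirty_day_challenge/day_1.py | is_correct_caps
-- ===== SOURCE A (Python) =====
-- import string
-- from typing import Optional
--
-- def is_correct_caps(word: Optional) -> bool:
--
--     if len(word) < 2:
--         return True
--
--     upper = set(string.ascii_uppercase)
--     lower = set(string.ascii_lowercase)
--
--     start = 1 if word[0] in upper else 0
--     case_set = upper if word[start] in upper else lower
--
--     for i in range(start, len(word)):
--         if word[i] not in case_set:
--             return False
--
--     return True
-- ===== SOURCE B (Python) =====
-- import string
--
-- def is_correct_caps(word):
--     if len(word) < 2: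
--         return True
--     upper = set(string.ascii_uppercase)
--     lower = set(string.ascii_lowercase)
--     all_upper = all(c in upper for c in word)
--     all_lower = all(c in lower for c in word)
--     cap = word[0] in upper and all(c in lower for c in word[1:])
--     return all_upper or all_lower or cap
-- ===== Notes on version B (the rewrite author's own statement) =====
-- stated objective: idiomatic
-- what changed: Replaces A's single adaptive pass (pick a start index and a case-set from the first one or two characters, then scan by index) with the explicit three-case detect-capital decomposition: all-upper, all-lower, or capitalized, each a separate whole-word scan.
import Mathlib
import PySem

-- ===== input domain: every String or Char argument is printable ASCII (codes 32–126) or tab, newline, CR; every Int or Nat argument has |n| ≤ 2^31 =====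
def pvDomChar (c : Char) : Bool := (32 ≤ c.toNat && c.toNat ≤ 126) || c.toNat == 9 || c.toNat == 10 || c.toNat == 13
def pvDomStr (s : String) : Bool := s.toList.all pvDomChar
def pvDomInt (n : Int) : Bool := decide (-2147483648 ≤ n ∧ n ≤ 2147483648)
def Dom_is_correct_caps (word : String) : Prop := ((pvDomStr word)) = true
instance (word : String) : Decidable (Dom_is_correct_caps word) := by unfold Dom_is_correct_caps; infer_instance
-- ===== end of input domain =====

-- B replaces A's single adaptive case-set scan by the explicit three-case decomposition
-- (all-upper / all-lower / capitalized), each a separate whole-word scan; same cost, more idiomatic.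

-- set(string.ascii_uppercase) / set(string.ascii_lowercase), shared by both ports
def pvUpper : List Char := ['A', 'B', 'C', 'D', 'E', 'F', 'G', 'H', 'I', 'J', 'K', 'L', 'M', 'N', 'O', 'P', 'Q', 'R', 'S', 'T', 'U', 'V', 'W', 'X', 'Y', 'Z']
def pvLower : List Char := ['a', 'b', 'c', 'd', 'e', 'f', 'g', 'h', 'i', 'j', 'k', 'l', 'm', 'n', 'o', 'p', 'q', 'r', 's', 't', 'u', 'v', 'w', 'x', 'y', 'z']

-- ===== PORT A =====
def is_correct_caps (word : String) : Bool :=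
  let cs := word.toList
  if cs.length < 2 then true
  else
    let start : Nat := if pvUpper.contains cs[0]! then 1 else 0
    let caseSet := if pvUpper.contains cs[start]! then pvUpper else pvLower
    -- for i in range(start, len(word)): if word[i] not in case_set: return False
    (List.range' start (cs.length - start)).all (fun i => caseSet.contains cs[i]!)

-- ===== PORT B =====
def is_correct_caps_alt (word : String) : Bool :=
  let cs := word.toList
  if cs.length < 2 then true
  else
    let allUpper := cs.all (fun c => pvUpper.contains c)
    let allLower := cs.all (fun c => pvLower.contains c)
    let cap := pvUpper.contains cs[0]! && (cs.drop 1).all (fun c => pvLower.contains c)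
    allUpper || allLower || cap

-- ===== PRECONDITION & SPEC =====
def Spec_is_correct_caps (word : String) (out : Bool) : Prop := out = is_correct_caps_alt word
instance (word : String) (out : Bool) : Decidable (Spec_is_correct_caps word out) := by unfold Spec_is_correct_caps; infer_instance

-- ===== CLAIM (what is proved, stated in full; the proofs are below) =====
def Claim_equal_is_correct_caps : Prop := ∀ (word : String), Dom_is_correct_caps word → Spec_is_correct_caps word (is_correct_caps word)

-- ===== LEMMAS AND PROOFS =====

-- an uppercase ASCII letter is never a lowercase one
theorem pv_disj (c : Char) (h : pvUpper.contains c = true) : pvLower.contains c = false := by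
  simp [pvUpper] at h
  rcases h with rfl|rfl|rfl|rfl|rfl|rfl|rfl|rfl|rfl|rfl|rfl|rfl|rfl|rfl|rfl|rfl|rfl|rfl|rfl|rfl|rfl|rfl|rfl|rfl|rfl|rfl <;> decide

-- the index loop over range(s, len l) checks exactly the suffix l.drop s
theorem pv_all_range' (p : Char → Bool) :
    ∀ (n : Nat) (l : List Char) (s : Nat), s + n = l.length →
      ((List.range' s n).all fun i => p l[i]!) = (l.drop s).all p := by
  intro n
  induction n with
  | zero =>
      intro l s h
      simp [List.drop_of_length_le (by omega : l.length ≤ s)]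
  | succ k ih =>
      intro l s h
      have hs : s < l.length := by omega
      have hdrop : l.drop s = l[s] :: l.drop (s + 1) := (List.getElem_cons_drop hs).symm
      rw [List.range'_succ, List.all_cons, hdrop, List.all_cons,
          getElem!_pos l s hs, ih l (s + 1) (by omega)]

theorem pv_main (word : String) : is_correct_caps word = is_correct_caps_alt word := by
  cases hcs : word.toList with
  | nil => simp [is_correct_caps, is_correct_caps_alt, hcs]
  | cons c0 t0 =>
    cases t0 with
    | nil => simp [is_correct_caps, is_correct_caps_alt, hcs]
    | cons c1 t =>
      have hne : ¬ (t.length + 1 + 1 < 2) := by omega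
      simp only [is_correct_caps, is_correct_caps_alt, hcs, List.length_cons]
      rw [if_neg hne, if_neg hne]
      simp only [List.getElem!_cons_zero]
      cases hu0 : pvUpper.contains c0 with
      | false =>
        simp only [hu0, Bool.false_eq_true, reduceIte, List.getElem!_cons_zero, Nat.sub_zero]
        rw [pv_all_range' (pvLower.contains) (t.length + 1 + 1) (c0 :: c1 :: t) 0
              (by simp only [List.length_cons]; omega)]
        simp only [List.drop_zero, List.all_cons, hu0, Bool.false_and, Bool.false_or,
          Bool.or_false]
      | true =>
        simp only [reduceIte, List.getElem!_cons_succ, List.getElem!_cons_zero]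
        rw [pv_all_range' _ (t.length + 1 + 1 - 1) (c0 :: c1 :: t) 1
              (by simp only [List.length_cons]; omega)]
        simp only [List.drop_succ_cons, List.drop_zero]
        cases hu1 : pvUpper.contains c1 with
        | true =>
          simp only [hu1, reduceIte, List.all_cons, hu0, pv_disj c0 hu0, pv_disj c1 hu1,
            Bool.true_and, Bool.false_and, Bool.and_false, Bool.or_false]
        | false =>
          simp only [hu1, Bool.false_eq_true, reduceIte, List.all_cons, hu0,
            pv_disj c0 hu0, Bool.true_and, Bool.false_and, Bool.and_false, Bool.false_or]

-- ===== VERDICT (by name: the statement is the Claim_ definition above) =====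
theorem is_correct_caps_spec : Claim_equal_is_correct_caps := by
  intro word _
  unfold Spec_is_correct_caps
  exact pv_main word
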